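-- pv_equiv track=rewrite | github.com/Swetha-Hariharan1810/LegalQA-Bot | Sample.py | group_words_into_elements
-- ===== SOURCE A (Python) =====
-- def group_words_into_elements(words):
--     elements = []
--     current_element = []
--     previous_end = None
--
--     for word_data in words:
--         start_offset = word_data['span']['offset']
--         end_offset = start_offset + word_data['span']['length']
--
--         if previous_end is not None and start_offset > previous_end + 1:
--             # New element if there is a gap between words
--             elements.append(current_element)
--             current_element = []
--
--         current_element.append(word_data)
--         previous_end = end_offset
--
--     # Add the last element
--     if current_element:
--         elements.append(current_element)
--
--     return elements
-- ===== SOURCE B (Python) =====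
-- def group_words_into_elements(words):
--     # Two-pointer run splitting: take each maximal run of gap-free words as one slice.
--     elements = []
--     i = 0
--     n = len(words)
--     while i < n:
--         end = words[i]['span']['offset'] + words[i]['span']['length']
--         j = i + 1
--         while j < n and words[j]['span']['offset'] <= end + 1:
--             end = words[j]['span']['offset'] + words[j]['span']['length']
--             j += 1
--         elements.append(words[i:j])
--         i = j
--     return elements
-- ===== Notes on version B (the rewrite author's own statement) =====
-- stated objective: alternative
-- what changed: Replaces A's single-pass accumulator (current_element list + previous_end sentinel + trailing flush) with a two-pointer run splitter that takes each maximal gap-free run of words as one slice of the input.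
import Mathlib
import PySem

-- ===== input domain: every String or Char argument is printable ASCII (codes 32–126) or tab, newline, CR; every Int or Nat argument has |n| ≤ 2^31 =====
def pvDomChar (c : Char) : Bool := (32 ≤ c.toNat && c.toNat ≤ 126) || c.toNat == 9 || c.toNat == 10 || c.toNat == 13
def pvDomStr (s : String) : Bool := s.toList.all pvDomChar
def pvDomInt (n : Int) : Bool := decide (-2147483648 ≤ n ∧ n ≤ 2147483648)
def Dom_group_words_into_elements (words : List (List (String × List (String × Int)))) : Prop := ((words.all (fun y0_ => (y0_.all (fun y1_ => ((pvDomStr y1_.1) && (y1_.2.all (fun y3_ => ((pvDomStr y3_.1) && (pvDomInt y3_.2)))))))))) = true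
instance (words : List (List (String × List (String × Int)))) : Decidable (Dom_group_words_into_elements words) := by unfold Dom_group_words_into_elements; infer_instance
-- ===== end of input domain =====

-- B replaces A's accumulator-and-flush pass by two-pointer maximal-run splitting; equal return value on Pre_ (no mutation involved).

-- shared accessors: word_data['span'], ['offset'], ['length'] (Pre_ guarantees the keys exist, so getD is exact there)
-- first-match association-list lookup (= Python dict access under the task's dict convention)
def pvLookup {α : Type} (d : List (String × α)) (x : String) : Option α :=
  match d with
  | [] => none
  | (k, v) :: r => if k == x then some v else pvLookup r x

def pvSpan (w : List (String × List (String × Int))) : List (String × Int) := (pvLookup w "span").getD []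
def pvOff (w : List (String × List (String × Int))) : Int := (pvLookup (pvSpan w) "offset").getD 0
def pvLen (w : List (String × List (String × Int))) : Int := (pvLookup (pvSpan w) "length").getD 0

-- ===== PORT A =====
-- A's loop state: (elements, current_element, previous_end)
def pvStepA (st : List (List (List (String × List (String × Int)))) × List (List (String × List (String × Int))) × Option Int)
    (w : List (String × List (String × Int))) :
    List (List (List (String × List (String × Int)))) × List (List (String × List (String × Int))) × Option Int :=
  let off := pvOff w
  let e := off + pvLen w
  match st with
  | (els, cur, pe) =>
    match pe with
    | some p => if off > p + 1 then (els ++ [cur], [w], some e) else (els, cur ++ [w], some e)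
    | none => (els, cur ++ [w], some e)

-- the trailing 'if current_element: elements.append(current_element)'
def pvFinishA (st : List (List (List (String × List (String × Int)))) × List (List (String × List (String × Int))) × Option Int) :
    List (List (List (String × List (String × Int)))) :=
  if st.2.1 ≠ [] then st.1 ++ [st.2.1] else st.1

def group_words_into_elements (words : List (List (String × List (String × Int)))) : List (List (List (String × List (String × Int)))) :=
  pvFinishA (words.foldl pvStepA ([], [], none))

-- ===== PORT B =====
-- inner while loop: consume the rest of the current run, given the running end offset
def pvTakeRun (e : Int) (xs : List (List (String × List (String × Int)))) :
    List (List (String × List (String × Int))) × List (List (String × List (String × Int))) :=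
  match xs with
  | [] => ([], [])
  | w :: ws =>
    if pvOff w ≤ e + 1 then
      let r := pvTakeRun (pvOff w + pvLen w) ws
      (w :: r.1, r.2)
    else ([], w :: ws)

theorem pvTakeRun_rest_le (e : Int) (xs : List (List (String × List (String × Int)))) :
    (pvTakeRun e xs).2.length ≤ xs.length := by
  induction xs generalizing e with
  | nil => simp [pvTakeRun]
  | cons w ws ih =>
    simp only [pvTakeRun]
    split
    · exact Nat.le_succ_of_le (ih _)
    · simp

-- outer while loop: peel one maximal run per step
def group_words_into_elements_alt (words : List (List (String × List (String × Int)))) : List (List (List (String × List (String × Int)))) :=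
  match words with
  | [] => []
  | w :: ws =>
    let r := pvTakeRun (pvOff w + pvLen w) ws
    (w :: r.1) :: group_words_into_elements_alt r.2
termination_by words.length
decreasing_by
  exact Nat.lt_succ_of_le (pvTakeRun_rest_le _ _)

-- ===== PRECONDITION & SPEC =====
-- Pre_ excludes exactly the inputs where Python A raises KeyError: some word lacks 'span', or its (first-matching) span dict lacks the key 'offset' or 'length'.
def Pre_group_words_into_elements (words : List (List (String × List (String × Int)))) : Prop :=
  ∀ w ∈ words, (List.lookup "span" w).any
    (fun s => decide ("offset" ∈ s.map Prod.fst) && decide ("length" ∈ s.map Prod.fst)) = true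
instance (words : List (List (String × List (String × Int)))) : Decidable (Pre_group_words_into_elements words) := by unfold Pre_group_words_into_elements; infer_instance

def pvWitness_group_words_into_elements : (List (List (String × List (String × Int)))) :=
  [[("span", [("offset", 0), ("length", 3)])], [("span", [("offset", 9), ("length", 2)])]]

def Spec_group_words_into_elements (words : List (List (String × List (String × Int)))) (out : List (List (List (String × List (String × Int))))) : Prop := out = group_words_into_elements_alt words
instance (words : List (List (String × List (String × Int)))) (out : List (List (List (String × List (String × Int))))) : Decidable (Spec_group_words_into_elements words out) := by unfold Spec_group_words_into_elements; infer_instance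

-- ===== CLAIM (what is proved, stated in full; the proofs are below) =====
def Claim_equal_group_words_into_elements : Prop := ∀ (words : List (List (String × List (String × Int)))), Dom_group_words_into_elements words → Pre_group_words_into_elements words → Spec_group_words_into_elements words (group_words_into_elements words)

-- ===== LEMMAS AND PROOFS =====

-- the fold with a nonempty current run, whose last word ends at e, produces els ++ (current run extended by the rest of its run) :: groups of the remainder
theorem pv_fold_run (xs : List (List (String × List (String × Int))))
    (els : List (List (List (String × List (String × Int)))))
    (cur : List (List (String × List (String × Int)))) (e : Int) (hcur : cur ≠ []) :
    pvFinishA (xs.foldl pvStepA (els, cur, some e))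
    = els ++ ((cur ++ (pvTakeRun e xs).1) :: group_words_into_elements_alt (pvTakeRun e xs).2) := by
  induction xs generalizing els cur e with
  | nil => simp [pvTakeRun, group_words_into_elements_alt, pvFinishA, hcur]
  | cons w ws ih =>
    simp only [List.foldl_cons, pvStepA, pvTakeRun]
    by_cases h : pvOff w ≤ e + 1
    · have hgt : ¬ pvOff w > e + 1 := by omega
      simp only [hgt, if_pos h, ite_false]
      rw [ih els (cur ++ [w]) (pvOff w + pvLen w) (by simp)]
      simp
    · have hgt : pvOff w > e + 1 := by omega
      simp only [if_pos hgt, if_neg h]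
      rw [ih (els ++ [cur]) ([w]) (pvOff w + pvLen w) (by simp)]
      simp [group_words_into_elements_alt]

-- ===== VERDICT (by name: the statement is the Claim_ definition above) =====
theorem group_words_into_elements_spec : Claim_equal_group_words_into_elements := by
  intro words _ _
  unfold Spec_group_words_into_elements group_words_into_elements
  match words with
  | [] => simp [group_words_into_elements_alt, pvFinishA]
  | w :: ws =>
    simp only [List.foldl_cons, pvStepA, List.nil_append]
    rw [pv_fold_run ws [] [w] (pvOff w + pvLen w) (by simp)]
    simp [group_words_into_elements_alt]
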